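-- pv_equiv track=rewrite | github.com/Levyaton/KAB-Semestralka | MonoalphabeticPass.py | getAlphabetDict
-- ===== SOURCE A (Python) =====
-- def getAlphabetDict(password, alphabet):
--     dict = {}
--
--     newAlph = alphabet
--     counter = 0
--     for char in password:
--         if char not in dict.keys():
--             dict[char] = alphabet[counter]
--             counter += 1
--
--     for char in newAlph:
--         if char in password:
--             newAlph = newAlph.replace(char, "")
--
--     for char in newAlph:
--         dict[char] = alphabet[counter]
--         counter += 1
--
--     return dict
-- ===== SOURCE B (Python) =====
-- def getAlphabetDict(password, alphabet):
--     # unique password chars in first-appearance order, then the alphabet chars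
--     # (with multiplicity) that do not occur in the password
--     pw = set(password)
--     keys = list(dict.fromkeys(password)) + [c for c in alphabet if c not in pw]
--     return {c: alphabet[i] for i, c in enumerate(keys)}
-- ===== Notes on version B (the rewrite author's own statement) =====
-- stated objective: faster
-- what changed: A threads a counter through three loops (conditional insert per password char, alphabet pruning via repeated quadratic str.replace with substring tests, then a second assignment loop); B builds the ordered key list once (dict.fromkeys plus a hash-set filter of the alphabet) and maps it to the alphabet in a single enumerate pass.
import Mathlib
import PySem

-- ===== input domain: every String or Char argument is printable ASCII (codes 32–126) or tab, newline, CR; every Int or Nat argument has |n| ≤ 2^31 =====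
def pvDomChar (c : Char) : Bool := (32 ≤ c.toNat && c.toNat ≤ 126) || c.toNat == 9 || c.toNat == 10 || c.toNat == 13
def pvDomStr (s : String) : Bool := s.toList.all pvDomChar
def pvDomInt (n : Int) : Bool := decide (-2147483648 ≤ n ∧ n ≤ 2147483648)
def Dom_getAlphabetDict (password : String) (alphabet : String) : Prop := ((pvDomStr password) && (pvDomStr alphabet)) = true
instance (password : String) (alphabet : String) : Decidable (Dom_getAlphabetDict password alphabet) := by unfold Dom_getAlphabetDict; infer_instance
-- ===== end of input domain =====

-- B replaces A's three counter-threaded loops (conditional assign, filter-by-string-replace,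
-- assign) by building the ordered key list once and mapping it to the alphabet in one
-- enumerate pass; same return value wherever A returns (Pre_ excludes exactly A's IndexError inputs).

-- shared helpers: a 1-char Python string, and the 1-char string alphabet[n]
-- (pyGetD's default is only reachable outside Pre_, where Python raises IndexError)
def pvSc (c : Char) : String := String.ofList [c]
def pvVal (Al : List Char) (n : Int) : String := String.ofList [PySem.List.pyGetD Al n ' ']

-- ===== PORT A =====
-- body of A's first loop: if char not in dict: dict[char] = alphabet[counter]; counter += 1
def pvStep1 (Al : List Char) (st : PySem.Dict String String × Int) (ch : Char) :
    PySem.Dict String String × Int :=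
  if st.1.contains (pvSc ch) = false then (st.1.insert (pvSc ch) (pvVal Al st.2), st.2 + 1) else st

-- body of A's third loop: dict[char] = alphabet[counter]; counter += 1
def pvStep3 (Al : List Char) (st : PySem.Dict String String × Int) (ch : Char) :
    PySem.Dict String String × Int :=
  (st.1.insert (pvSc ch) (pvVal Al st.2), st.2 + 1)

def getAlphabetDict (password : String) (alphabet : String) : List (String × String) :=
  let s1 := password.toList.foldl (pvStep1 alphabet.toList) (PySem.Dict.empty, 0)
  -- for char in newAlph (the loop iterates the string newAlph was bound to at loop entry,
  -- i.e. alphabet): if char in password: newAlph = newAlph.replace(char, "")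
  let newAlph := alphabet.toList.foldl
    (fun na ch => if PySem.Str.isIn (pvSc ch) password then PySem.Str.replace na (pvSc ch) "" else na)
    alphabet
  let s2 := newAlph.toList.foldl (pvStep3 alphabet.toList) s1
  s2.1.items

-- ===== PORT B =====
-- body of B's dict comprehension over enumerate(keys): c -> alphabet[i]
def pvStepB (Al : List Char) (d : PySem.Dict String String) (p : Int × Char) :
    PySem.Dict String String :=
  d.insert (pvSc p.2) (pvVal Al p.1)

def getAlphabetDict_alt (password : String) (alphabet : String) : List (String × String) :=
  -- keys = list(dict.fromkeys(password)) + [c for c in alphabet if c not in set(password)]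
  let keys := PySem.List.dedup password.toList
      ++ alphabet.toList.filter (fun c => !(PySem.Set.ofList password.toList).contains c)
  -- {c: alphabet[i] for i, c in enumerate(keys)}
  ((PySem.List.enumerate keys 0).foldl (pvStepB alphabet.toList) PySem.Dict.empty).items

-- ===== PRECONDITION & SPEC =====
-- Pre_ excludes exactly the inputs on which Python A raises IndexError: the number of keys
-- assigned (distinct password chars plus alphabet chars outside the password, with
-- multiplicity) would exceed len(alphabet).
def Pre_getAlphabetDict (password : String) (alphabet : String) : Prop :=
  (PySem.List.dedup password.toList).length
    + (alphabet.toList.filter (fun c => decide (c ∉ password.toList))).length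
    ≤ alphabet.toList.length
instance (password : String) (alphabet : String) : Decidable (Pre_getAlphabetDict password alphabet) := by
  unfold Pre_getAlphabetDict; infer_instance

def pvWitness_getAlphabetDict : String × String := ("ab", "abc")

def Spec_getAlphabetDict (password : String) (alphabet : String) (out : List (String × String)) : Prop := out = getAlphabetDict_alt password alphabet
instance (password : String) (alphabet : String) (out : List (String × String)) : Decidable (Spec_getAlphabetDict password alphabet out) := by unfold Spec_getAlphabetDict; infer_instance

-- ===== CLAIM (what is proved, stated in full; the proofs are below) =====
def Claim_equal_getAlphabetDict : Prop := ∀ (password : String) (alphabet : String), Dom_getAlphabetDict password alphabet → Pre_getAlphabetDict password alphabet → Spec_getAlphabetDict password alphabet (getAlphabetDict password alphabet)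

-- ===== LEMMAS AND PROOFS =====

theorem pvSc_beq (c x : Char) : (pvSc c == pvSc x) = (c == x) := by
  by_cases h : c = x
  · subst h; simp
  · have hne : pvSc c ≠ pvSc x := by
      intro hs
      have h2 : (String.ofList [c]).toList = (String.ofList [x]).toList := by
        simpa [pvSc] using congrArg String.toList hs
      rw [String.toList_ofList, String.toList_ofList] at h2
      exact h (by injection h2)
    simp [beq_eq_false_iff_ne.2 hne, beq_eq_false_iff_ne.2 h]

theorem pv_contains_insert (d : PySem.Dict String String) (k v k' : String) :
    ((d.insert k v).contains k') = (d.contains k' || k == k') := by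
  by_cases h : d.contains k = true
  · have hins : d.insert k v = ⟨List.map (fun p => if (p.1 == k) = true then (k, v) else p) d.items⟩ := by
      rw [PySem.Dict.insert, if_pos h]
    rw [hins]
    show (List.map (fun p => if (p.1 == k) = true then (k, v) else p) d.items).any (fun p => p.1 == k')
        = (d.contains k' || k == k')
    rw [List.any_map]
    by_cases hk : k = k'
    · subst hk
      simp only [beq_self_eq_true, Bool.or_true]
      rw [PySem.Dict.contains] at h
      rcases List.any_eq_true.1 h with ⟨p, hp, hpk⟩
      refine List.any_eq_true.2 ⟨p, hp, ?_⟩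
      simp [Function.comp, hpk]
    · rw [beq_eq_false_iff_ne.2 hk, Bool.or_false, PySem.Dict.contains]
      refine List.any_congr rfl ?_
      intro p
      by_cases hpk : (p.1 == k) = true
      · simp [Function.comp, beq_eq_false_iff_ne.2 hk, eq_of_beq hpk]
      · simp [Function.comp, hpk]
  · have hins : d.insert k v = ⟨d.items ++ [(k, v)]⟩ := by
      rw [PySem.Dict.insert, if_neg h]
    rw [hins]
    show (d.items ++ [(k, v)]).any (fun p => p.1 == k') = (d.contains k' || k == k')
    rw [List.any_append, PySem.Dict.contains]
    simp

-- the accumulator of Set.ofList's foldl is a prefix of the result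
theorem pv_prefix_foldl_add (t acc : List Char) :
    acc <+: List.foldl PySem.Set.add acc t := by
  induction t generalizing acc with
  | nil => exact List.prefix_refl _
  | cons c t ih =>
      refine List.IsPrefix.trans ?_ (ih (PySem.Set.add acc c))
      unfold PySem.Set.add
      split
      · exact List.prefix_refl _
      · exact ⟨[c], rfl⟩

-- A's first loop performs exactly the unconditional inserts of the fresh keys, in
-- first-appearance order (the part Set.ofList's foldl appends beyond acc)
theorem pv_loop1_eq (Al : List Char) (chars : List Char) (d : PySem.Dict String String)
    (n : Int) (acc : List Char)
    (h : ∀ c : Char, d.contains (pvSc c) = acc.contains c) :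
    List.foldl (pvStep1 Al) (d, n) chars
      = List.foldl (pvStep3 Al) (d, n) ((List.foldl PySem.Set.add acc chars).drop acc.length) := by
  induction chars generalizing d n acc with
  | nil => simp
  | cons c t ih =>
      by_cases hc : acc.contains c = true
      · have hmem : c ∈ acc := List.contains_iff_mem.1 hc
        have hstep : pvStep1 Al (d, n) c = (d, n) := by
          simp [pvStep1, h c, hmem]
        have hadd : PySem.Set.add acc c = acc := by simp [PySem.Set.add, hmem]
        simpa [hstep, hadd] using ih d n acc h
      · have hmem : c ∉ acc := fun hm => hc (List.contains_iff_mem.2 hm)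
        have hstep : pvStep1 Al (d, n) c
            = (d.insert (pvSc c) (pvVal Al n), n + 1) := by
          simp [pvStep1, h c, hmem]
        have hadd : PySem.Set.add acc c = acc ++ [c] := by
          simp [PySem.Set.add, hmem]
        have hpre : acc ++ [c] <+: List.foldl PySem.Set.add (acc ++ [c]) t :=
          pv_prefix_foldl_add t (acc ++ [c])
        rcases hpre with ⟨r, hr⟩
        have h' : ∀ x : Char,
            (d.insert (pvSc c) (pvVal Al n)).contains (pvSc x) = (acc ++ [c]).contains x := by
          intro x
          rw [pv_contains_insert, h x, pvSc_beq]
          by_cases hx : x = c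
          · subst hx; simp
          · simp [beq_eq_false_iff_ne.2 (Ne.symm hx), hx]
        have ihx := ih (d.insert (pvSc c) (pvVal Al n)) (n + 1) (acc ++ [c]) h'
        have hd1 : (acc ++ [c] ++ r).drop acc.length = c :: r := by
          rw [List.append_assoc, List.drop_left]; rfl
        have hd2 : (acc ++ [c] ++ r).drop (acc ++ [c]).length = r := by
          rw [List.drop_left]
        rw [List.foldl_cons, hstep]
        rw [← hr, hd2] at ihx
        conv_rhs => rw [List.foldl_cons, hadd, ← hr, hd1, List.foldl_cons]
        exact ihx.trans rfl

-- threading the counter through pvStep3 is folding pvStepB over enumerate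
theorem pv_loop3_enum (Al : List Char) (ks : List Char) (d : PySem.Dict String String) (n : Int) :
    (List.foldl (pvStep3 Al) (d, n) ks).1
      = List.foldl (pvStepB Al) d (PySem.List.enumerate ks n) := by
  induction ks generalizing d n with
  | nil => simp [PySem.List.enumerate]
  | cons c t ih =>
      rw [show PySem.List.enumerate (c :: t) n = (n, c) :: PySem.List.enumerate t (n + 1) from rfl]
      simpa [pvStep3, pvStepB] using ih (d.insert (pvSc c) (pvVal Al n)) (n + 1)

-- s.replace(c, "") for a single character deletes every occurrence of that character
theorem pv_replace_go (c : Char) (fuel : Nat) (l acc : List Char) (h : l.length ≤ fuel) :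
    PySem.Chars.replace.go [c] [] fuel l acc = acc.reverse ++ l.filter (fun x => !(x == c)) := by
  induction fuel generalizing l acc with
  | zero =>
      have : l = [] := List.eq_nil_of_length_eq_zero (Nat.le_zero.1 h)
      subst this
      rw [PySem.Chars.replace.go.eq_def]
      simp
  | succ fuel ih =>
      cases l with
      | nil => rw [PySem.Chars.replace.go.eq_def]; simp
      | cons c' t =>
          rw [PySem.Chars.replace.go.eq_def]
          simp only []
          by_cases hc : c = c'
          · subst hc
            have hpre : ([c] : List Char).isPrefixOf (c :: t) = true := by
              simp [List.isPrefixOf]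
            rw [if_pos hpre]
            show PySem.Chars.replace.go [c] [] fuel t acc = _
            rw [ih t acc (by simpa using Nat.le_of_succ_le_succ (by simpa using h))]
            simp
          · have hpre : ([c] : List Char).isPrefixOf (c' :: t) = false := by
              simp [List.isPrefixOf, hc]
            rw [if_neg (by simp [hpre])]
            rw [ih t (c' :: acc) (by simpa using Nat.le_of_succ_le_succ (by simpa using h))]
            simp [Ne.symm hc]

theorem pv_replace_filter (c : Char) (l : List Char) :
    PySem.Chars.replace l [c] [] = l.filter (fun x => !(x == c)) := by
  have : ([c] : List Char).isEmpty = false := rfl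
  rw [PySem.Chars.replace, this]
  simpa using pv_replace_go c l.length l [] (le_refl _)

theorem pv_isIn_singleton (c : Char) (l : List Char) :
    PySem.Chars.isIn [c] l = decide (c ∈ l) := by
  by_cases h : c ∈ l
  · rcases List.append_of_mem h with ⟨s, t, rfl⟩
    have : ([c] : List Char) <:+: s ++ c :: t := ⟨s, t, by simp⟩
    simp [h, (PySem.Chars.isIn_iff_infix _ _).2 this]
  · have : ¬ ([c] : List Char) <:+: l := fun hinf => h (hinf.subset (by simp))
    simp [h, (PySem.Chars.isIn_eq_false_iff _ _).2 this]

-- A's second loop, moved to the list side: iterated single-char replace = one filter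
theorem pv_loop2_toList (password : String) (chars : List Char) (s : String) :
    (List.foldl
      (fun na ch => if PySem.Str.isIn (pvSc ch) password then PySem.Str.replace na (pvSc ch) "" else na)
      s chars).toList
    = List.foldl
        (fun na ch => if decide (ch ∈ password.toList) then na.filter (fun x => !(x == ch)) else na)
        s.toList chars := by
  induction chars generalizing s with
  | nil => rfl
  | cons ch t ih =>
      have hin : PySem.Str.isIn (pvSc ch) password = decide (ch ∈ password.toList) := by
        rw [PySem.Str.isIn]
        have : (pvSc ch).toList = [ch] := by simp [pvSc]
        rw [this, pv_isIn_singleton]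
      by_cases h : ch ∈ password.toList
      · have hrep : (PySem.Str.replace s (pvSc ch) "").toList
            = s.toList.filter (fun x => !(x == ch)) := by
          rw [PySem.Str.toList_replace]
          have : (pvSc ch).toList = [ch] := by simp [pvSc]
          rw [this, show ("" : String).toList = [] from rfl, pv_replace_filter]
        simp only [List.foldl_cons, hin, h, decide_true, if_true]
        rw [ih (PySem.Str.replace s (pvSc ch) "")]
        rw [hrep]
      · simp only [List.foldl_cons, hin, h, decide_false, Bool.false_eq_true, if_false]
        exact ih s

-- the pure filter form of the second loop's fold
theorem pv_loop2_filter (P : List Char) (chars : List Char) (s : List Char) :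
    List.foldl
      (fun na ch => if decide (ch ∈ P) then na.filter (fun x => !(x == ch)) else na)
      s chars
    = s.filter (fun x => !(decide (x ∈ chars) && decide (x ∈ P))) := by
  induction chars generalizing s with
  | nil => simp
  | cons c t ih =>
      by_cases hc : c ∈ P
      · simp only [List.foldl_cons, hc, decide_true, if_true]
        rw [ih (s.filter (fun x => !(x == c))), List.filter_filter]
        apply List.filter_congr
        intro x _
        by_cases hx : x = c
        · subst hx; simp [hc]
        · simp [hx, beq_eq_false_iff_ne.2 hx]
      · simp only [List.foldl_cons, hc, decide_false, Bool.false_eq_true, if_false]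
        rw [ih s]
        apply List.filter_congr
        intro x _
        by_cases hx : x = c
        · subst hx; simp [hc]
        · simp [hx]

-- ===== VERDICT (by name: the statement is the Claim_ definition above) =====
theorem getAlphabetDict_spec : Claim_equal_getAlphabetDict := by
  intro password alphabet _hD _hP
  show getAlphabetDict password alphabet = getAlphabetDict_alt password alphabet
  simp only [getAlphabetDict, getAlphabetDict_alt]
  -- A's first loop is the unconditional insertion of dedup(password)
  have hempty : ∀ c : Char, (PySem.Dict.empty : PySem.Dict String String).contains (pvSc c)
      = ([] : List Char).contains c := fun _ => rfl
  have h1 := pv_loop1_eq alphabet.toList password.toList PySem.Dict.empty 0 [] hempty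
  simp only [List.length_nil, List.drop_zero] at h1
  have hded : PySem.List.dedup password.toList
      = List.foldl PySem.Set.add [] password.toList := rfl
  -- A's second loop computes the filtered alphabet
  have h2 : (List.foldl
      (fun na ch => if PySem.Str.isIn (pvSc ch) password then PySem.Str.replace na (pvSc ch) "" else na)
      alphabet alphabet.toList).toList
      = alphabet.toList.filter (fun x => !decide (x ∈ password.toList)) := by
    rw [pv_loop2_toList password alphabet.toList alphabet,
        pv_loop2_filter password.toList alphabet.toList alphabet.toList]
    refine List.filter_congr ?_
    intro x hx
    simp [hx]
  -- B's filter predicate is the same membership test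
  have h3 : alphabet.toList.filter (fun c => !(PySem.Set.ofList password.toList).contains c)
      = alphabet.toList.filter (fun x => !decide (x ∈ password.toList)) := by
    refine List.filter_congr ?_
    intro c _
    by_cases hcP : c ∈ password.toList
    · simp [hcP]
    · have : ¬ c ∈ PySem.Set.ofList password.toList := fun hm => hcP ((PySem.Set.mem_ofList _ _).1 hm)
      simp [hcP, this]
  rw [h1, hded, h2, h3, ← List.foldl_append, pv_loop3_enum]
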